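-- pv_equiv track=rewrite | github.com/Amichai/dfs | master_scrape_process/player_to_player_correlation.py | get_slate_to_team_to_players
-- ===== SOURCE A (Python) =====
-- name_transform = {"Guillermo Hernangomez": 'Willy Hernangomez', "Cam Thomas": "Cameron Thomas", "Moe Harkless": 'Maurice Harkless', 'Juancho Hernangómez':"Juancho Hernangomez", "Guillermo Hernangómez": 'Willy Hernangomez', 'Timothé Luwawu-Cabarrot': 'Timothe Luwawu-Cabarrot', "Nah'Shon Hyland": 'Bones Hyland'}
--
-- team_transform = {"NYK": "NY", "GSW": "GS", "PHX": "PHO", "SAS": "SA", "NOP": "NO"}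
--
-- def normalize_team_name(team):
--     if team in team_transform:
--         return team_transform[team]
--
--     return team
--
-- def normalize_name(name):
--     parts = name.split(" ")
--     if len(parts) > 2:
--         return "{} {}".format(parts[0], parts[1])
--
--     name = name.replace(".", "")
--     if name in name_transform:
--         return name_transform[name]
--
--     return name
--
-- def get_slate_to_team_to_players(all_games, fd_players):
--     slate_to_team_to_players = {}
--     for game in all_games:
--         slate_to_team_to_players[game] = {}
--         matchup = game.split(' ')[0]
--         teams = matchup.split("@")
--
--         for team in teams:
--             team = normalize_team_name(team)
--             player_slate_info = {}
--             slate_to_team_to_players[game][team] = player_slate_info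
--             for name, player in fd_players.items():
--                 name_normalized = normalize_name(name)
--                 if player[3] == team:
--                     assert name_normalized not in player_slate_info
--                     player_slate_info[name_normalized] = [name_normalized, player[3], player[1], player[2]]
--
--     return slate_to_team_to_players
-- ===== SOURCE B (Python) =====
-- name_transform = {"Guillermo Hernangomez": 'Willy Hernangomez', "Cam Thomas": "Cameron Thomas", "Moe Harkless": 'Maurice Harkless', 'Juancho Hernangómez':"Juancho Hernangomez", "Guillermo Hernangómez": 'Willy Hernangomez', 'Timothé Luwawu-Cabarrot': 'Timothe Luwawu-Cabarrot', "Nah'Shon Hyland": 'Bones Hyland'}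
--
-- team_transform = {"NYK": "NY", "GSW": "GS", "PHX": "PHO", "SAS": "SA", "NOP": "NO"}
--
-- def normalize_team_name(team):
--     if team in team_transform:
--         return team_transform[team]
--     return team
--
-- def normalize_name(name):
--     parts = name.split(" ")
--     if len(parts) > 2:
--         return "{} {}".format(parts[0], parts[1])
--     name = name.replace(".", "")
--     if name in name_transform:
--         return name_transform[name]
--     return name
--
-- def get_slate_to_team_to_players(all_games, fd_players):
--     # one pass: record each game's normalized teams and the set of teams that occur
--     game_to_teams = {}
--     needed = set()
--     for game in all_games:
--         teams = [normalize_team_name(t) for t in game.split(' ')[0].split('@')]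
--         game_to_teams[game] = teams
--         needed.update(teams)
--
--     # single indexing pass over the players instead of one scan per (game, team)
--     team_index = {}
--     if all_games:
--         for name, player in fd_players.items():
--             team = player[3]
--             if team in needed:
--                 nn = normalize_name(name)
--                 bucket = team_index.setdefault(team, {})
--                 assert nn not in bucket
--                 bucket[nn] = [nn, team, player[1], player[2]]
--
--     return {game: {team: dict(team_index.get(team, {})) for team in teams}
--             for game, teams in game_to_teams.items()}
-- ===== Notes on version B (the rewrite author's own statement) =====
-- stated objective: faster
-- what changed: Instead of rescanning the whole player dict for every (game, team) pair, B builds a team -> players index in a single pass over fd_players (restricted to teams occurring in the games) and then assembles each game's entry by dictionary lookup.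
import Mathlib
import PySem

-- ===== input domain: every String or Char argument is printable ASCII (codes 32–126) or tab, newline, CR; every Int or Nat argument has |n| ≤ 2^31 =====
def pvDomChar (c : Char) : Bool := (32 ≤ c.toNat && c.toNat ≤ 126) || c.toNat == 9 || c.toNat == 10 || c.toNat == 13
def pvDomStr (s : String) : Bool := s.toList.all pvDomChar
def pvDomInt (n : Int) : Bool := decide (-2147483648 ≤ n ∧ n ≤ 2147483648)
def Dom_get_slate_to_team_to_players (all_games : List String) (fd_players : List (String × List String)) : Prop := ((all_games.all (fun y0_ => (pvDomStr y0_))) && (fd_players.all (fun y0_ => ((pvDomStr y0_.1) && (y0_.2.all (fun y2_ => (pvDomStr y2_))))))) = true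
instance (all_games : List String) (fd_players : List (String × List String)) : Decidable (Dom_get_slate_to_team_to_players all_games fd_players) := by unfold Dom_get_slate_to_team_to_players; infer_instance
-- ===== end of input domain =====

-- B replaces A's rescan of the whole player dict for every (game, team) pair by one indexing pass
-- over the players (objective: faster). Equivalence is about the RETURN value (neither mutates its arguments).

-- ===== PORT A =====
-- module-level constants and helpers shared by both Python files
def pv_name_transform : PySem.Dict String String := PySem.Dict.mk
  [("Guillermo Hernangomez", "Willy Hernangomez"), ("Cam Thomas", "Cameron Thomas"),
   ("Moe Harkless", "Maurice Harkless"), ("Juancho Hernangómez", "Juancho Hernangomez"),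
   ("Guillermo Hernangómez", "Willy Hernangomez"), ("Timothé Luwawu-Cabarrot", "Timothe Luwawu-Cabarrot"),
   ("Nah'Shon Hyland", "Bones Hyland")]

def pv_team_transform : PySem.Dict String String := PySem.Dict.mk
  [("NYK", "NY"), ("GSW", "GS"), ("PHX", "PHO"), ("SAS", "SA"), ("NOP", "NO")]

def normalize_team_name (team : String) : String :=
  match pv_team_transform.get? team with
  | some t => t
  | none => team

def normalize_name (name : String) : String :=
  let parts := (PySem.Str.split? name " ").getD []
  if parts.length > 2 then
    PySem.Str.join " " [parts.getD 0 "", parts.getD 1 ""]   -- "{} {}".format(parts[0], parts[1])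
  else
    let name := PySem.Str.replace name "." ""
    match pv_name_transform.get? name with
    | some n => n
    | none => name

-- inner 'for name, player in fd_players.items()' loop of A (player[i] via pyGet?, total form;
-- out-of-range, i.e. Python IndexError, is excluded by Pre_; the assert is excluded by Pre_ as well)
def pvA_playerScan (fd_players : List (String × List String)) (team : String) :
    PySem.Dict String (List String) :=
  fd_players.foldl (fun psi np =>
    let name_normalized := normalize_name np.1
    if (PySem.List.pyGet? np.2 3).getD "" = team then
      psi.insert name_normalized
        [name_normalized, (PySem.List.pyGet? np.2 3).getD "",
         (PySem.List.pyGet? np.2 1).getD "", (PySem.List.pyGet? np.2 2).getD ""]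
    else psi) (PySem.Dict.mk [])

-- 'for team in teams' loop of A; Python fills slate[game][team] in place after inserting an
-- empty dict — ported exactly as building the inner dict and inserting it at the same key
def pvA_gameDict (fd_players : List (String × List String)) (game : String) :
    PySem.Dict String (PySem.Dict String (List String)) :=
  let matchup := ((PySem.Str.split? game " ").getD []).getD 0 ""
  let teams := (PySem.Str.split? matchup "@").getD []
  teams.foldl (fun gd team =>
    let team := normalize_team_name team
    gd.insert team (pvA_playerScan fd_players team)) (PySem.Dict.mk [])

def get_slate_to_team_to_players (all_games : List String) (fd_players : List (String × List String)) :
    List (String × List (String × List (String × List String))) :=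
  (all_games.foldl (fun acc game => acc.insert game (pvA_gameDict fd_players game))
      (PySem.Dict.mk [] : PySem.Dict String (PySem.Dict String (PySem.Dict String (List String))))).items.map
    (fun p => (p.1, p.2.items.map (fun q => (q.1, q.2.items))))

-- ===== PORT B =====
-- [normalize_team_name(t) for t in game.split(' ')[0].split('@')]
def pvB_teams (game : String) : List String :=
  ((PySem.Str.split? (((PySem.Str.split? game " ").getD []).getD 0 "") "@").getD []).map normalize_team_name

-- B's single indexing pass over fd_players (setdefault + in-place bucket update ported as
-- get-or-empty then insert back; the assert is excluded by Pre_)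
def pvB_index (needed : PySem.Set String) (fd_players : List (String × List String)) :
    PySem.Dict String (PySem.Dict String (List String)) :=
  fd_players.foldl (fun ti np =>
    let team := (PySem.List.pyGet? np.2 3).getD ""
    if team ∈ needed then
      let nn := normalize_name np.1
      let bucket := (ti.get? team).getD (PySem.Dict.mk [])
      ti.insert team (bucket.insert nn
        [nn, team, (PySem.List.pyGet? np.2 1).getD "", (PySem.List.pyGet? np.2 2).getD ""])
    else ti) (PySem.Dict.mk [])

def get_slate_to_team_to_players_alt (all_games : List String) (fd_players : List (String × List String)) :
    List (String × List (String × List (String × List String))) :=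
  let st := all_games.foldl
    (fun (st : PySem.Dict String (List String) × PySem.Set String) game =>
      let teams := pvB_teams game
      (st.1.insert game teams, teams.foldl (fun s t => s.add t) st.2))
    (PySem.Dict.mk [], PySem.Set.ofList [])
  let team_index := if all_games.isEmpty then PySem.Dict.mk [] else pvB_index st.2 fd_players
  (st.1.items.foldl (fun res p =>
      res.insert p.1 (p.2.foldl (fun gd t =>
        gd.insert t ((team_index.get? t).getD (PySem.Dict.mk []))) (PySem.Dict.mk [])))
    (PySem.Dict.mk [] : PySem.Dict String (PySem.Dict String (PySem.Dict String (List String))))).items.map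
    (fun p => (p.1, p.2.items.map (fun q => (q.1, q.2.items))))

-- ===== PRECONDITION & SPEC =====
-- Pre_ excludes exactly the inputs on which the Python A raises: IndexError (some player list
-- shorter than 4 while at least one game exists) and AssertionError (two players on the same
-- team of some slate game sharing a normalized name).
def Pre_get_slate_to_team_to_players (all_games : List String) (fd_players : List (String × List String)) : Prop :=
  all_games = [] ∨
  ((∀ p ∈ fd_players, 4 ≤ p.2.length) ∧
   List.Pairwise (fun a b =>
     normalize_name a.1 = normalize_name b.1 →
     (PySem.List.pyGet? a.2 3).getD "" = (PySem.List.pyGet? b.2 3).getD "" →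
     ∀ g ∈ all_games, (PySem.List.pyGet? a.2 3).getD "" ∉ pvB_teams g) fd_players)

instance (all_games : List String) (fd_players : List (String × List String)) : Decidable (Pre_get_slate_to_team_to_players all_games fd_players) := by unfold Pre_get_slate_to_team_to_players; infer_instance

def pvWitness_get_slate_to_team_to_players : List String × (List (String × List String)) :=
  (["AAA@NYK 07:00PM ET", "BBB@CCC"],
   [("John A. Smith", ["83", "11.5", "22", "AAA"]), ("Bob Jones III x", ["84", "1", "2", "NY"])])

def Spec_get_slate_to_team_to_players (all_games : List String) (fd_players : List (String × List String)) (out : List (String × List (String × List (String × List String)))) : Prop := out = get_slate_to_team_to_players_alt all_games fd_players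
instance (all_games : List String) (fd_players : List (String × List String)) (out : List (String × List (String × List (String × List String)))) : Decidable (Spec_get_slate_to_team_to_players all_games fd_players out) := by unfold Spec_get_slate_to_team_to_players; infer_instance

-- ===== CLAIM (what is proved, stated in full; the proofs are below) =====
def Claim_equal_get_slate_to_team_to_players : Prop := ∀ (all_games : List String) (fd_players : List (String × List String)), Dom_get_slate_to_team_to_players all_games fd_players → Pre_get_slate_to_team_to_players all_games fd_players → Spec_get_slate_to_team_to_players all_games fd_players (get_slate_to_team_to_players all_games fd_players)

-- ===== LEMMAS AND PROOFS =====

-- the set of normalized team names occurring across all_games (B's 'needed')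
def pvNeeded (gs : List String) : PySem.Set String :=
  gs.foldl (fun s g => (pvB_teams g).foldl (fun s t => s.add t) s) (PySem.Set.ofList [])

lemma pv_items_insert_eq {ν : Type} (d : PySem.Dict String ν) (k : String) (v : ν) :
    (d.insert k v).items =
      if d.contains k then d.items.map (fun p => if p.1 == k then (k, v) else p)
      else d.items ++ [(k, v)] := by
  by_cases hc : d.contains k <;> simp [PySem.Dict.insert, hc]

-- B's pair-state fold splits into its two independent components
lemma pv_st_split (gs : List String) (p : PySem.Dict String (List String) × PySem.Set String) :
    gs.foldl (fun st game =>
      (st.1.insert game (pvB_teams game), (pvB_teams game).foldl (fun s t => s.add t) st.2)) p =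
    (gs.foldl (fun d g => d.insert g (pvB_teams g)) p.1,
     gs.foldl (fun s g => (pvB_teams g).foldl (fun s t => s.add t) s) p.2) := by
  induction gs generalizing p with
  | nil => rfl
  | cons g gs ih =>
    simp only [List.foldl_cons]
    exact ih (p.1.insert g (pvB_teams g), (pvB_teams g).foldl (fun s t => s.add t) p.2)

lemma pv_mem_addFold {x : String} (ts : List String) (s : PySem.Set String)
    (h : x ∈ s ∨ x ∈ ts) : x ∈ ts.foldl (fun s t => s.add t) s := by
  induction ts generalizing s with
  | nil => simpa using h
  | cons t ts ih =>
    simp only [List.foldl_cons]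
    rcases h with h | h
    · exact ih _ (Or.inl ((PySem.Set.mem_add s t x).mpr (Or.inl h)))
    · rcases List.mem_cons.mp h with h | h
      · exact ih _ (Or.inl ((PySem.Set.mem_add s t x).mpr (Or.inr h)))
      · exact ih _ (Or.inr h)

lemma pv_needed_mono {x : String} (gs : List String) (s : PySem.Set String) (h : x ∈ s) :
    x ∈ gs.foldl (fun s g => (pvB_teams g).foldl (fun s t => s.add t) s) s := by
  induction gs generalizing s with
  | nil => exact h
  | cons g gs ih =>
    simp only [List.foldl_cons]
    exact ih _ (pv_mem_addFold _ _ (Or.inl h))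

lemma pv_mem_needed {g t : String} (gs : List String) (s : PySem.Set String)
    (hg : g ∈ gs) (ht : t ∈ pvB_teams g) :
    t ∈ gs.foldl (fun s g => (pvB_teams g).foldl (fun s t => s.add t) s) s := by
  induction gs generalizing s with
  | nil => cases hg
  | cons g' gs ih =>
    simp only [List.foldl_cons]
    rcases List.mem_cons.mp hg with h | h
    · subst h
      exact pv_needed_mono gs _ (pv_mem_addFold _ _ (Or.inr ht))
    · exact ih _ h

-- B's bucket for a needed team t evolves exactly like A's player scan for t
lemma pv_bucket (S : PySem.Set String) (fp : List (String × List String))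
    (ti : PySem.Dict String (PySem.Dict String (List String))) (t : String) (ht : t ∈ S) :
    ((fp.foldl (fun ti np =>
        if (PySem.List.pyGet? np.2 3).getD "" ∈ S then
          ti.insert ((PySem.List.pyGet? np.2 3).getD "")
            (((ti.get? ((PySem.List.pyGet? np.2 3).getD "")).getD (PySem.Dict.mk [])).insert
              (normalize_name np.1)
              [normalize_name np.1, (PySem.List.pyGet? np.2 3).getD "",
               (PySem.List.pyGet? np.2 1).getD "", (PySem.List.pyGet? np.2 2).getD ""])
        else ti) ti).get? t).getD (PySem.Dict.mk []) =
    fp.foldl (fun psi np =>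
      if (PySem.List.pyGet? np.2 3).getD "" = t then
        psi.insert (normalize_name np.1)
          [normalize_name np.1, (PySem.List.pyGet? np.2 3).getD "",
           (PySem.List.pyGet? np.2 1).getD "", (PySem.List.pyGet? np.2 2).getD ""]
      else psi) ((ti.get? t).getD (PySem.Dict.mk [])) := by
  induction fp generalizing ti with
  | nil => rfl
  | cons np fp ih =>
    simp only [List.foldl_cons]
    by_cases hmem : (PySem.List.pyGet? np.2 3).getD "" ∈ S
    · by_cases heq : (PySem.List.pyGet? np.2 3).getD "" = t
      · rw [if_pos hmem, if_pos heq, ih, heq, PySem.Dict.get?_insert_self, Option.getD_some]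
      · rw [if_pos hmem, if_neg heq, ih, PySem.Dict.get?_insert_of_ne _ _ (Ne.symm heq)]
    · rw [if_neg hmem, if_neg (fun heq => hmem (by rw [heq]; exact ht)), ih]

-- looking a needed team up in B's index gives exactly A's player scan
lemma pv_lookup (S : PySem.Set String) (fp : List (String × List String)) (t : String)
    (ht : t ∈ S) :
    ((pvB_index S fp).get? t).getD (PySem.Dict.mk []) = pvA_playerScan fp t :=
  pv_bucket S fp (PySem.Dict.mk []) t ht

-- the per-game dict B assembles by lookup equals A's per-game dict
lemma pv_game_eq (gs : List String) (fp : List (String × List String)) {g : String}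
    (hg : g ∈ gs) :
    (pvB_teams g).foldl (fun gd t =>
        gd.insert t (((pvB_index (pvNeeded gs) fp).get? t).getD (PySem.Dict.mk [])))
      (PySem.Dict.mk []) = pvA_gameDict fp g := by
  simp only [pvB_teams, pvA_gameDict]
  rw [List.foldl_map]
  refine PySem.List.foldl_congr_mem _ _ _ _ (fun acc x hx => ?_)
  exact congrArg (acc.insert (normalize_team_name x))
    (pv_lookup _ fp _ (pv_mem_needed gs _ hg (List.mem_map.mpr ⟨x, hx, rfl⟩)))

-- invariant of the game→teams dict: every item is (g, pvB_teams g) for some g ∈ gs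
lemma pv_items_insert {ν : Type} (d : PySem.Dict String ν) (k : String) (v : ν)
    (P : String × ν → Prop) (hd : ∀ p ∈ d.items, P p) (hkv : P (k, v)) :
    ∀ p ∈ (d.insert k v).items, P p := by
  intro p hp
  rw [pv_items_insert_eq] at hp
  by_cases hc : d.contains k
  · rw [if_pos hc] at hp
    rcases List.mem_map.mp hp with ⟨q, hq, rfl⟩
    by_cases h : (q.1 == k) = true
    · rw [if_pos h]; exact hkv
    · rw [if_neg h]; exact hd q hq
  · rw [if_neg hc] at hp
    rcases List.mem_append.mp hp with h | h
    · exact hd p h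
    · rw [List.mem_singleton] at h; exact h ▸ hkv

lemma pv_gt_inv (gs : List String) (acc : PySem.Dict String (List String))
    (P : String × List String → Prop) (hacc : ∀ p ∈ acc.items, P p)
    (hgs : ∀ g ∈ gs, P (g, pvB_teams g)) :
    ∀ p ∈ (gs.foldl (fun d g => d.insert g (pvB_teams g)) acc).items, P p := by
  induction gs generalizing acc with
  | nil => exact hacc
  | cons g gs ih =>
    simp only [List.foldl_cons]
    exact ih _ (pv_items_insert acc g (pvB_teams g) P hacc (hgs g (by simp)))
      (fun g' hg' => hgs g' (List.mem_cons_of_mem g hg'))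

lemma pv_keys_insert {ν : Type} (d : PySem.Dict String ν) (k : String) (v : ν) :
    (d.insert k v).items.map Prod.fst =
      if d.contains k then d.items.map Prod.fst else d.items.map Prod.fst ++ [k] := by
  rw [pv_items_insert_eq]
  by_cases hc : d.contains k
  · rw [if_pos hc, if_pos hc, List.map_map]
    refine List.map_congr_left (fun q _ => ?_)
    by_cases h : q.1 = k
    · simp [h]
    · simp [h]
  · rw [if_neg hc, if_neg hc, List.map_append]
    simp

lemma pv_get_insfold {ν : Type} (gs : List String) (H : String → ν)
    (acc : PySem.Dict String ν) (k : String) :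
    (gs.foldl (fun r g => r.insert g (H g)) acc).get? k =
      if k ∈ gs then some (H k) else acc.get? k := by
  induction gs using List.reverseRecOn with
  | nil => simp
  | append_singleton gs g ih =>
    rw [List.foldl_append]
    simp only [List.foldl_cons, List.foldl_nil]
    by_cases hk : k = g
    · subst hk; simp [PySem.Dict.get?_insert_self]
    · rw [PySem.Dict.get?_insert_of_ne _ _ hk, ih]
      simp [List.mem_append, hk]

lemma pv_nodup_keys_insfold {ν : Type} (gs : List String) (H : String → ν) :
    ((gs.foldl (fun r g => r.insert g (H g)) (PySem.Dict.mk [])).items.map Prod.fst).Nodup := by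
  induction gs using List.reverseRecOn with
  | nil => simp
  | append_singleton gs g ih =>
    rw [List.foldl_append]
    simp only [List.foldl_cons, List.foldl_nil]
    rw [pv_keys_insert]
    by_cases hc : (gs.foldl (fun r g => r.insert g (H g)) (PySem.Dict.mk [])).contains g
    · rw [if_pos hc]; exact ih
    · have hnm : g ∉ (gs.foldl (fun r g => r.insert g (H g)) (PySem.Dict.mk [])).items.map Prod.fst := by
        intro hmem
        exact hc ((PySem.Dict.contains_iff_mem_keys _ g).mpr hmem)
      rw [if_neg hc, List.nodup_append]
      refine ⟨ih, List.nodup_singleton g, ?_⟩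
      intro a ha b hb
      rw [List.mem_singleton] at hb
      exact fun heq => hnm ((heq.trans hb) ▸ ha)

lemma pv_insert_noop {ν : Type} (d : PySem.Dict String ν) (k : String) (v : ν)
    (hnd : (d.items.map Prod.fst).Nodup) (hget : d.get? k = some v) : d.insert k v = d := by
  simp only [PySem.Dict.get?, Option.map_eq_some_iff] at hget
  rcases hget with ⟨q, hq, hqv⟩
  have hqmem : q ∈ d.items := List.mem_of_find?_eq_some hq
  have hqk : (q.1 == k) = true := by simpa using List.find?_some hq
  have hc : d.contains k = true := by
    rw [PySem.Dict.contains_iff_mem_keys]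
    show k ∈ d.items.map Prod.fst
    exact List.mem_map.mpr ⟨q, hqmem, eq_of_beq hqk⟩
  apply PySem.Dict.ext
  rw [pv_items_insert_eq, if_pos hc]
  have hpt : ∀ p ∈ d.items, (if p.1 == k then (k, v) else p) = id p := by
    intro p hp
    by_cases h : (p.1 == k) = true
    · rw [if_pos h]
      have hpq : p = q :=
        List.inj_on_of_nodup_map hnd hp hqmem ((eq_of_beq h).trans (eq_of_beq hqk).symm)
      rw [hpq, ← eq_of_beq hqk, ← hqv]
      rfl
    · rw [if_neg h]
      rfl
  rw [List.map_congr_left hpt, List.map_id]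

lemma pv_fold_fst {τ ν : Type} (H : String → ν) (l : List (String × τ))
    (r0 : PySem.Dict String ν) :
    l.foldl (fun r p => r.insert p.1 (H p.1)) r0 =
      (l.map Prod.fst).foldl (fun r k => r.insert k (H k)) r0 := by
  rw [List.foldl_map]

-- folding B's per-key function over the items of the games dict equals A's direct fold over
-- all_games: duplicate game strings only re-insert the same value
lemma pv_dupfold {τ ν : Type} (gs : List String) (T : String → τ) (H : String → ν) :
    ((gs.foldl (fun d g => d.insert g (T g)) (PySem.Dict.mk [])).items).foldl
      (fun r p => r.insert p.1 (H p.1)) (PySem.Dict.mk []) =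
    gs.foldl (fun r g => r.insert g (H g)) (PySem.Dict.mk []) := by
  induction gs using List.reverseRecOn with
  | nil => rfl
  | append_singleton gs g ih =>
    rw [List.foldl_append, List.foldl_append]
    simp only [List.foldl_cons, List.foldl_nil]
    by_cases hc : (gs.foldl (fun d g => d.insert g (T g)) (PySem.Dict.mk [])).contains g
    · have hfst := pv_keys_insert (gs.foldl (fun d g => d.insert g (T g)) (PySem.Dict.mk [])) g (T g)
      rw [if_pos hc] at hfst
      rw [pv_fold_fst, hfst, ← pv_fold_fst, ih]
      have hmem : g ∈ gs := by
        by_contra hgs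
        have hnone : (gs.foldl (fun d g => d.insert g (T g)) (PySem.Dict.mk [])).get? g = none := by
          rw [pv_get_insfold, if_neg hgs]; rfl
        rw [PySem.Dict.contains_iff_mem_keys] at hc
        have hc' : g ∈ (gs.foldl (fun d g => d.insert g (T g)) (PySem.Dict.mk [])).items.map Prod.fst := hc
        rcases List.mem_map.mp hc' with ⟨q, hq, hqk⟩
        have hne : (gs.foldl (fun d g => d.insert g (T g)) (PySem.Dict.mk [])).get? g ≠ none := by
          intro hn
          simp only [PySem.Dict.get?, Option.map_eq_none_iff] at hn
          rw [List.find?_eq_none] at hn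
          exact hn q hq (by simp [hqk])
        exact hne hnone
      refine (pv_insert_noop _ g (H g) (pv_nodup_keys_insfold gs H) ?_).symm
      rw [pv_get_insfold, if_pos hmem]
    · rw [pv_items_insert_eq, if_neg hc, List.foldl_append]
      simp only [List.foldl_cons, List.foldl_nil]
      rw [ih]

-- the master equality: A and B return the same value on EVERY input
lemma pv_master (gs : List String) (fp : List (String × List String)) :
    get_slate_to_team_to_players gs fp = get_slate_to_team_to_players_alt gs fp := by
  simp only [get_slate_to_team_to_players, get_slate_to_team_to_players_alt]
  rw [pv_st_split]
  by_cases hgs : gs = []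
  · subst hgs; rfl
  · have hne : gs.isEmpty = false := by simpa [List.isEmpty_iff] using hgs
    rw [hne]
    have hcongr := PySem.List.foldl_congr_mem
      ((gs.foldl (fun d g => d.insert g (pvB_teams g)) (PySem.Dict.mk [])).items)
      (fun res p => res.insert p.1 (p.2.foldl (fun gd t =>
        gd.insert t (((pvB_index (pvNeeded gs) fp).get? t).getD (PySem.Dict.mk [])))
        (PySem.Dict.mk [])))
      (fun res p => res.insert p.1 (pvA_gameDict fp p.1))
      (PySem.Dict.mk [])
      (fun acc p hp => by
        have hinv := pv_gt_inv gs (PySem.Dict.mk [])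
          (fun p => p.1 ∈ gs ∧ p.2 = pvB_teams p.1) (by simp)
          (fun g hg => ⟨hg, rfl⟩) p hp
        exact congrArg (acc.insert p.1) (by rw [hinv.2]; exact pv_game_eq gs fp hinv.1))
    have hAB : gs.foldl (fun acc game => acc.insert game (pvA_gameDict fp game)) (PySem.Dict.mk []) =
        ((gs.foldl (fun d g => d.insert g (pvB_teams g)) (PySem.Dict.mk [])).items).foldl
          (fun res p => res.insert p.1 (p.2.foldl (fun gd t =>
            gd.insert t (((pvB_index (pvNeeded gs) fp).get? t).getD (PySem.Dict.mk [])))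
            (PySem.Dict.mk []))) (PySem.Dict.mk []) :=
      ((pv_dupfold gs pvB_teams (fun g => pvA_gameDict fp g)).symm).trans hcongr.symm
    exact congrArg (fun d : PySem.Dict String (PySem.Dict String (PySem.Dict String (List String))) =>
      d.items.map (fun p => (p.1, p.2.items.map (fun q => (q.1, q.2.items))))) hAB

-- ===== VERDICT (by name: the statement is the Claim_ definition above) =====
theorem get_slate_to_team_to_players_spec : Claim_equal_get_slate_to_team_to_players := by
  intro all_games fd_players _ _
  exact pv_master all_games fd_players
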